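-- pv_equiv track=rewrite | github.com/Monjurul-190629/Problem-Solving | LightOj_Filled_Containers.py | min_max_container_capacity
-- ===== SOURCE A (Python) =====
-- def is_possible(vessels, m, max_capacity):
--     count = 1
--     current_sum = 0
--
--     for milk in vessels:
--         if milk > max_capacity:
--             return False
--         if current_sum + milk > max_capacity:
--             count += 1
--             current_sum = milk
--         else:
--             current_sum += milk
--
--     return count <= m
--
-- def min_max_container_capacity(vessels, m):
--     low = max(vessels)
--     high = sum(vessels)
--     answer = high
--
--     while low <= high:
--         mid = (low + high) // 2
--         if is_possible(vessels, m, mid):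
--             answer = mid
--             high = mid - 1
--         else:
--             low = mid + 1
--
--     return answer
-- ===== SOURCE B (Python) =====
-- def min_max_container_capacity(vessels, m):
--     biggest = max(vessels)
--     total = sum(vessels)
--
--     def groups_needed(cap):
--         groups, load = 1, 0
--         for x in vessels:
--             if load + x > cap:
--                 groups += 1
--                 load = x
--             else:
--                 load += x
--         return groups
--
--     def search(lo, hi):
--         if lo > hi:
--             return None
--         mid = (lo + hi) // 2
--         if biggest <= mid and groups_needed(mid) <= m:
--             found = search(lo, mid - 1)
--             return mid if found is None else found
--         return search(mid + 1, hi)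
--
--     r = search(biggest, total)
--     return total if r is None else r
-- ===== Notes on version B (the rewrite author's own statement) =====
-- stated objective: alternative
-- what changed: The accumulator-carrying while-loop bisection is replaced by an Option-returning recursive descent with no answer variable, and the early-exit greedy feasibility test is split into a one-time max precheck plus a pure group-count scan.
import Mathlib
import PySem

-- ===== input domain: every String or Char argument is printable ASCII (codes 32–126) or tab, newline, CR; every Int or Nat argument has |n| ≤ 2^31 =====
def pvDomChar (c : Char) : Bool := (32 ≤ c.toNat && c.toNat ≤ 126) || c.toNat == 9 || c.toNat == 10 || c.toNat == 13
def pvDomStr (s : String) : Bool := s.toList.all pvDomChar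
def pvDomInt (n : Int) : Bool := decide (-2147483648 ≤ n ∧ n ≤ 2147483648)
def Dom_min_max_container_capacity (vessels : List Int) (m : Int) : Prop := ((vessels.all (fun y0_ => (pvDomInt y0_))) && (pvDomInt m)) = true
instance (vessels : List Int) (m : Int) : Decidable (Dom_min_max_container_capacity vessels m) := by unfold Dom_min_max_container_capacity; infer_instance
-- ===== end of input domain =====

-- B changes the decomposition only (recursive Option-returning bisection, split feasibility test); equivalence is on the return value.

-- ===== PORT A =====
-- the for-loop of is_possible, state (count, current_sum); early 'return False' = the false branch
def isPossibleLoop (m cap : Int) : List Int → Int → Int → Bool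
  | [], count, _ => decide (count ≤ m)
  | milk :: rest, count, cur =>
    if cap < milk then false
    else if cap < cur + milk then isPossibleLoop m cap rest (count + 1) milk
    else isPossibleLoop m cap rest count (cur + milk)

def is_possible (vessels : List Int) (m cap : Int) : Bool := isPossibleLoop m cap vessels 1 0

-- termination lemmas for the two bisection loops (cited by name in decreasing_by)
theorem pvMidDec₁ {low high : Int} (h : low ≤ high) :
    ((PySem.Int.floordiv (low + high) 2 - 1) + 1 - low).toNat < (high + 1 - low).toNat := by
  have := PySem.Int.floordiv_two_mid_bounds h; omega

theorem pvMidDec₂ {low high : Int} (h : low ≤ high) :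
    (high + 1 - (PySem.Int.floordiv (low + high) 2 + 1)).toNat < (high + 1 - low).toNat := by
  have := PySem.Int.floordiv_two_mid_bounds h; omega

-- the while low <= high loop, carrying (low, high, answer)
def loopA (vessels : List Int) (m low high answer : Int) : Int :=
  if h : low ≤ high then
    let mid := PySem.Int.floordiv (low + high) 2
    if is_possible vessels m mid then loopA vessels m low (mid - 1) mid
    else loopA vessels m (mid + 1) high answer
  else answer
termination_by (high + 1 - low).toNat
decreasing_by
  · exact pvMidDec₁ h
  · exact pvMidDec₂ h

def min_max_container_capacity (vessels : List Int) (m : Int) : Int :=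
  -- max([]) raises ValueError in Python; Pre_ excludes the empty list, .getD 0 is never read there
  let low := (PySem.List.max? vessels (fun x => x)).getD 0
  let high := vessels.sum
  loopA vessels m low high high

-- ===== PORT B =====
-- groups_needed's for-loop, state (groups, load)
def groupsNeededLoop (cap : Int) : List Int → Int → Int → Int
  | [], groups, _ => groups
  | x :: rest, groups, load =>
    if cap < load + x then groupsNeededLoop cap rest (groups + 1) x
    else groupsNeededLoop cap rest groups (load + x)

-- the recursive search: None = no feasible capacity in [lo, hi]
def searchB (vessels : List Int) (m : Int) (biggest : Int) (lo hi : Int) : Option Int :=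
  if h : lo ≤ hi then
    let mid := PySem.Int.floordiv (lo + hi) 2
    if biggest ≤ mid ∧ groupsNeededLoop mid vessels 1 0 ≤ m then
      match searchB vessels m biggest lo (mid - 1) with
      | none => some mid
      | some found => some found
    else searchB vessels m biggest (mid + 1) hi
  else none
termination_by (hi + 1 - lo).toNat
decreasing_by
  · exact pvMidDec₁ h
  · exact pvMidDec₂ h

def min_max_container_capacity_alt (vessels : List Int) (m : Int) : Int :=
  let biggest := (PySem.List.max? vessels (fun x => x)).getD 0
  let total := vessels.sum
  match searchB vessels m biggest biggest total with
  | none => total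
  | some r => r

-- ===== PRECONDITION & SPEC =====
-- Pre_: Python's max([]) raises ValueError on the empty list, so A returns only on nonempty vessels.
def Pre_min_max_container_capacity (vessels : List Int) (m : Int) : Prop := vessels ≠ []
instance (vessels : List Int) (m : Int) : Decidable (Pre_min_max_container_capacity vessels m) := by unfold Pre_min_max_container_capacity; infer_instance

def pvWitness_min_max_container_capacity : List Int × Int := ([3, 1, 2], 2)

def Spec_min_max_container_capacity (vessels : List Int) (m : Int) (out : Int) : Prop := out = min_max_container_capacity_alt vessels m
instance (vessels : List Int) (m : Int) (out : Int) : Decidable (Spec_min_max_container_capacity vessels m out) := by unfold Spec_min_max_container_capacity; infer_instance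

-- ===== CLAIM (what is proved, stated in full; the proofs are below) =====
def Claim_equal_min_max_container_capacity : Prop := ∀ (vessels : List Int) (m : Int), Dom_min_max_container_capacity vessels m → Pre_min_max_container_capacity vessels m → Spec_min_max_container_capacity vessels m (min_max_container_capacity vessels m)

-- ===== LEMMAS AND PROOFS =====

-- A's early-exit greedy loop = "no remaining element exceeds cap" && "group count fits"
theorem isPossibleLoop_eq (m cap : Int) (l : List Int) (count cur : Int) :
    isPossibleLoop m cap l count cur
      = (decide (∀ x ∈ l, x ≤ cap) && decide (groupsNeededLoop cap l count cur ≤ m)) := by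
  induction l generalizing count cur with
  | nil => simp [isPossibleLoop, groupsNeededLoop]
  | cons x rest ih =>
    by_cases hx : cap < x
    · simp [isPossibleLoop, hx]
    · by_cases hb : cap < cur + x
      · simp only [isPossibleLoop, groupsNeededLoop, if_neg hx, if_pos hb, ih]
        simp [show x ≤ cap by omega]
      · simp only [isPossibleLoop, groupsNeededLoop, if_neg hx, if_neg hb, ih]
        simp [show x ≤ cap by omega]

-- for nonempty vessels, "every element ≤ cap" is "max ≤ cap"
theorem all_le_iff_max_le (vessels : List Int) (b cap : Int)
    (hmax : PySem.List.max? vessels (fun x => x) = some b) :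
    (∀ x ∈ vessels, x ≤ cap) ↔ b ≤ cap := by
  constructor
  · intro h; exact h b (PySem.List.max?_mem hmax)
  · intro h x hx; exact le_trans (PySem.List.max?_isMax hmax x hx) h

-- A's feasibility test = B's split test, as the bisection guards
theorem guard_eq (vessels : List Int) (m b cap : Int)
    (hmax : PySem.List.max? vessels (fun x => x) = some b) :
    is_possible vessels m cap
      = decide (b ≤ cap ∧ groupsNeededLoop cap vessels 1 0 ≤ m) := by
  rw [is_possible, isPossibleLoop_eq]
  simp [all_le_iff_max_le vessels b cap hmax]

-- A's accumulator loop = B's Option recursion with a default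
theorem loopA_eq_searchB (vessels : List Int) (m b : Int)
    (hmax : PySem.List.max? vessels (fun x => x) = some b) :
    ∀ low high answer : Int,
      loopA vessels m low high answer = (searchB vessels m b low high).getD answer := by
  intro low high answer
  generalize hk : (high + 1 - low).toNat = k
  induction k using Nat.strong_induction_on generalizing low high answer with
  | _ k ih =>
  rw [loopA, searchB]
  by_cases h : low ≤ high
  · simp only [dif_pos h]
    have hmid := PySem.Int.floordiv_two_mid_bounds h
    set mid := PySem.Int.floordiv (low + high) 2 with hmiddef
    rw [guard_eq vessels m b mid hmax]
    by_cases hg : b ≤ mid ∧ groupsNeededLoop mid vessels 1 0 ≤ m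
    · simp only [hg]
      rw [ih ((mid - 1) + 1 - low).toNat (by omega) low (mid - 1) mid rfl]
      cases searchB vessels m b low (mid - 1) with
      | none => simp
      | some r => simp
    · simp only [hg, decide_false, if_false]
      exact ih (high + 1 - (mid + 1)).toNat (by omega) (mid + 1) high answer rfl
  · simp [h]

-- ===== VERDICT (by name: the statement is the Claim_ definition above) =====
theorem min_max_container_capacity_spec : Claim_equal_min_max_container_capacity := by
  intro vessels m _ hpre
  unfold Spec_min_max_container_capacity min_max_container_capacity min_max_container_capacity_alt
  have hmax : PySem.List.max? vessels (fun x => x)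
      = some (PySem.List.maxD vessels (fun x => x) 0) :=
    PySem.List.max?_eq_some_maxD vessels (fun x => x) 0 hpre
  set b := PySem.List.maxD vessels (fun x => x) 0 with hb
  simp only [hmax, Option.getD_some]
  rw [loopA_eq_searchB vessels m b hmax]
  cases searchB vessels m b b vessels.sum with
  | none => simp
  | some r => simp
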